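-- pv_equiv track=rewrite | github.com/Bruhtek/agh-wdi | offline/palindrom.py | find_all_anti_crosses
-- ===== SOURCE A (Python) =====
-- def find_all_anti_crosses(tab: list[str]) -> list[str]:
--     n = len(tab)
--     res = []
--
--     for col in range(n):
--         anti_diag = ""
--         row, c = 0, col
--         while row < n and c >= 0:
--             anti_diag += tab[row][c]
--             row += 1
--             c -= 1
--         if len(anti_diag) >= 5:
--             res.append(anti_diag)
--
--     for row in range(1, n):
--         anti_diag = ""
--         r, col = row, n - 1
--         while r < n and col >= 0:
--             anti_diag += tab[r][col]
--             r += 1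
--             col -= 1
--         if len(anti_diag) >= 5:
--             res.append(anti_diag)
--
--     return res
-- ===== SOURCE B (Python) =====
-- def find_all_anti_crosses(tab: list[str]) -> list[str]:
--     n = len(tab)
--     buckets = [""] * (2 * n - 1) if n else []
--     for i in range(n):
--         for j in range(n):
--             buckets[i + j] += tab[i][j]
--     return [d for d in buckets if len(d) >= 5]
-- ===== Notes on version B (the rewrite author's own statement) =====
-- stated objective: simpler
-- what changed: A scans each anti-diagonal with its own while-loop in two column/row passes; B makes a single row-major pass over the grid, appending each cell tab[i][j] to a bucket keyed by i+j, then keeps the buckets of length >= 5.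
import Mathlib
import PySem

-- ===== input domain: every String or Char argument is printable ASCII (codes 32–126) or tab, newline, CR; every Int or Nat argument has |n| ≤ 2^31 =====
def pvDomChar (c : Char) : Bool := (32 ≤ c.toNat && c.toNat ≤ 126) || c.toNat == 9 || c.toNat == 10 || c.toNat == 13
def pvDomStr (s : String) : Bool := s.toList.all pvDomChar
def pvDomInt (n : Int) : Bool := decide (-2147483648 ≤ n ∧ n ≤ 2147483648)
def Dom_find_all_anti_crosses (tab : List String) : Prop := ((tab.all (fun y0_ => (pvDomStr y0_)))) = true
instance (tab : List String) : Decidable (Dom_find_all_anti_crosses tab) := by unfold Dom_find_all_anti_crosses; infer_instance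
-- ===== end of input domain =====

-- B replaces A's two per-diagonal while-loop scans by one row-major bucket pass keyed by i+j (simpler decomposition, same O(n^2) cost).

-- ===== PORT A =====
-- tab[row][c] — string indexing; out of range is Python's IndexError, excluded by Pre_ (the default ' ' is never reached on Pre_)
def pvCell (tab : List String) (row : Nat) (c : Int) : Char :=
  (PySem.Str.pyGet? (tab.getD row "") c).getD ' '

-- the while loop 'while row < n and c >= 0: anti_diag += tab[row][c]; row += 1; c -= 1' (both of A's while loops are this code)
def pvWhileDiag (tab : List String) (n : Nat) (row : Nat) (c : Int) (acc : List Char) : List Char :=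
  if _h : row < n ∧ 0 ≤ c then
    pvWhileDiag tab n (row + 1) (c - 1) (acc ++ [pvCell tab row c])
  else acc
termination_by n - row

def find_all_anti_crosses (tab : List String) : List String :=
  let n := tab.length
  let res := (List.range n).foldl (fun res (col : Nat) =>
      let d := pvWhileDiag tab n 0 (col : Int) []
      if 5 ≤ d.length then res ++ [String.ofList d] else res) []
  (PySem.List.pyRange 1 (n : Int) 1).foldl (fun res row =>
      let d := pvWhileDiag tab n row.toNat ((n : Int) - 1) []
      if 5 ≤ d.length then res ++ [String.ofList d] else res) res

-- ===== PORT B =====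
def find_all_anti_crosses_alt (tab : List String) : List String :=
  let n := tab.length
  let buckets0 : List (List Char) := if n = 0 then [] else List.replicate (2 * n - 1) []
  let buckets := (List.range n).foldl (fun bs i =>
      (List.range n).foldl (fun bs j =>
        bs.modify (i + j) (fun d => d ++ [pvCell tab i (j : Int)])) bs) buckets0
  (buckets.filter (fun d => 5 ≤ d.length)).map String.ofList

-- ===== PRECONDITION & SPEC =====
-- A raises IndexError iff some row string is shorter than the number of rows (every cell (i,j), i,j < n, is read); Pre_ excludes exactly those inputs.
def Pre_find_all_anti_crosses (tab : List String) : Prop :=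
  ∀ s ∈ tab, tab.length ≤ s.toList.length
instance (tab : List String) : Decidable (Pre_find_all_anti_crosses tab) := by
  unfold Pre_find_all_anti_crosses; infer_instance

def pvWitness_find_all_anti_crosses : List String :=
  ["abcde", "fghij", "klmno", "pqrst", "uvwxy"]

def Spec_find_all_anti_crosses (tab : List String) (out : List String) : Prop := out = find_all_anti_crosses_alt tab
instance (tab : List String) (out : List String) : Decidable (Spec_find_all_anti_crosses tab out) := by unfold Spec_find_all_anti_crosses; infer_instance

-- ===== CLAIM (what is proved, stated in full; the proofs are below) =====
def Claim_equal_find_all_anti_crosses : Prop := ∀ (tab : List String), Dom_find_all_anti_crosses tab → Pre_find_all_anti_crosses tab → Spec_find_all_anti_crosses tab (find_all_anti_crosses tab)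

-- ===== LEMMAS AND PROOFS =====

-- the character at cell (i, j), Nat form
def dcell (tab : List String) (i j : Nat) : Char :=
  ((tab.getD i "").toList[j]?).getD ' '

-- chars of anti-diagonal s contributed by rows i < m (row i lies on it iff i ≤ s < i + n)
def dpart (tab : List String) (n m s : Nat) : List Char :=
  (List.range m).filterMap (fun i =>
    if i ≤ s ∧ s < i + n then some (dcell tab i (s - i)) else none)

lemma pvCell_eq (tab : List String) (i j : Nat) :
    pvCell tab i (j : Int) = dcell tab i j := by
  simp [pvCell, dcell]

lemma whileDiag_eq (tab : List String) (n : Nat) :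
    ∀ (row : Nat) (c : Int) (acc : List Char),
      pvWhileDiag tab n row c acc
        = acc ++ (List.range' row (min (n - row) (c + 1).toNat)).map
            (fun i => dcell tab i ((c + row).toNat - i)) := by
  suffices H : ∀ (fuel row : Nat) (c : Int) (acc : List Char), n - row ≤ fuel →
      pvWhileDiag tab n row c acc
        = acc ++ (List.range' row (min (n - row) (c + 1).toNat)).map
            (fun i => dcell tab i ((c + row).toNat - i)) by
    intro row c acc; exact H (n - row) row c acc le_rfl
  intro fuel
  induction fuel with
  | zero =>
    intro row c acc h
    rw [pvWhileDiag]
    have : ¬ (row < n ∧ 0 ≤ c) := by omega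
    simp [this]
    have : n - row = 0 := by omega
    simp [this]
  | succ f ih =>
    intro row c acc h
    rw [pvWhileDiag]
    by_cases hc : row < n ∧ 0 ≤ c
    · rw [dif_pos hc]
      rw [ih (row + 1) (c - 1) _ (by omega)]
      have hcell : pvCell tab row c = dcell tab row c.toNat := by
        have : c = ((c.toNat : Nat) : Int) := (Int.toNat_of_nonneg hc.2).symm
        rw [this, pvCell_eq]; congr 1
      have hm : min (n - row) (c + 1).toNat = (min (n - (row+1)) ((c-1) + 1).toNat) + 1 := by
        omega
      rw [hm, List.range'_succ, List.map_cons]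
      have hidx : (c + row).toNat - row = c.toNat := by omega
      have hfun : (fun i => dcell tab i ((c - 1 + ((row + 1 : Nat) : Int)).toNat - i))
          = (fun i => dcell tab i ((c + row).toNat - i)) := by
        funext i; congr 1; push_cast; omega
      rw [hfun, hidx, hcell]
      simp
    · rw [dif_neg hc]
      have : min (n - row) (c + 1).toNat = 0 := by omega
      simp [this]

lemma dpart_succ (tab : List String) (n m s : Nat) :
    dpart tab n (m + 1) s
      = dpart tab n m s ++ (if m ≤ s ∧ s < m + n then [dcell tab m (s - m)] else []) := by
  unfold dpart
  rw [List.range_succ, List.filterMap_append]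
  congr 1
  split_ifs <;> simp_all

lemma inner_fold_getElem (tab : List String) (i s : Nat) :
    ∀ (m : Nat) (bs : List (List Char)),
      (((List.range m).foldl (fun bs j =>
          bs.modify (i + j) (fun d => d ++ [pvCell tab i (j : Int)])) bs)[s]?)
        = bs[s]?.map (fun d => if i ≤ s ∧ s < i + m then d ++ [dcell tab i (s - i)] else d) := by
  intro m
  induction m with
  | zero =>
    intro bs
    rcases h : bs[s]? with _ | d
    · simp [h]
    · simp only [List.range_zero, List.foldl_nil, h, Option.map_some]
      rw [if_neg (by omega)]
  | succ m ih =>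
    intro bs
    rw [List.range_succ, List.foldl_append, List.foldl_cons, List.foldl_nil,
      List.getElem?_modify, ih]
    rcases h : bs[s]? with _ | d
    · simp
    · simp only [Option.map_some, Option.map_eq_map, Option.map_some]
      congr 1
      by_cases him : i + m = s
      · rw [if_pos him, if_neg (by omega), if_pos (by omega)]
        have : pvCell tab i (m : Int) = dcell tab i (s - i) := by
          rw [pvCell_eq]; congr 1; omega
        rw [this]
      · rw [if_neg him]
        by_cases hc : i ≤ s ∧ s < i + m
        · rw [if_pos hc, if_pos (by omega)]
        · rw [if_neg hc, if_neg (by omega)]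

lemma outer_fold_getElem (tab : List String) (n s : Nat) :
    ∀ (m : Nat) (bs : List (List Char)),
      (((List.range m).foldl (fun bs i =>
          (List.range n).foldl (fun bs j =>
            bs.modify (i + j) (fun d => d ++ [pvCell tab i (j : Int)])) bs) bs)[s]?)
        = bs[s]?.map (fun d => d ++ dpart tab n m s) := by
  intro m
  induction m with
  | zero =>
    intro bs
    simp [dpart]
  | succ m ih =>
    intro bs
    rw [List.range_succ, List.foldl_append, List.foldl_cons, List.foldl_nil,
      inner_fold_getElem, ih, Option.map_map, dpart_succ]
    rcases h : bs[s]? with _ | d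
    · simp
    · simp only [Option.map_some, Function.comp_apply]
      congr 1
      split_ifs <;> simp

lemma filterMap_range_interval {α : Type} (g : Nat → α) (lo : Nat) :
    ∀ (n hi : Nat), hi ≤ n → lo ≤ hi →
    (List.range n).filterMap (fun i => if lo ≤ i ∧ i < hi then some (g i) else none)
      = (List.range' lo (hi - lo)).map g := by
  intro n
  induction n with
  | zero => intro hi h1 h2; simp; omega
  | succ n ih =>
    intro hi h1 h2
    rw [List.range_succ, List.filterMap_append]
    by_cases hn : hi ≤ n
    · rw [ih hi hn h2]
      have : ¬ (lo ≤ n ∧ n < hi) := by omega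
      simp [this]
    · have hhi : hi = n + 1 := by omega
      subst hhi
      by_cases hlo : lo = n + 1
      · subst hlo
        have e1 : List.filterMap (fun i => if n + 1 ≤ i ∧ i < n + 1 then some (g i) else none) (List.range n) = [] :=
          List.filterMap_eq_nil_iff.mpr (fun i hi => by
            simp only [List.mem_range] at hi; rw [if_neg (by omega)])
        have e2 : (if n + 1 ≤ n ∧ n < n + 1 then some (g n) else none) = none := by
          rw [if_neg (by omega)]
        simp only [List.filterMap_cons, List.filterMap_nil, e1, e2]
        simp
      · have hlo' : lo ≤ n := by omega
        have hcg : (List.range n).filterMap (fun i => if lo ≤ i ∧ i < n + 1 then some (g i) else none)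
            = (List.range n).filterMap (fun i => if lo ≤ i ∧ i < n then some (g i) else none) := by
          apply List.filterMap_congr
          intro x hx
          simp only [List.mem_range] at hx
          by_cases h : lo ≤ x
          · rw [if_pos (by omega), if_pos (by omega)]
          · rw [if_neg (by omega), if_neg (by omega)]
        rw [hcg, ih n le_rfl hlo']
        have h5 : n + 1 - lo = (n - lo) + 1 := by omega
        rw [h5, List.range'_concat]
        have : lo + 1 * (n - lo) = n := by omega
        rw [this]
        have : lo ≤ n ∧ n < n + 1 := by omega
        simp [this]

lemma dpart_full (tab : List String) (n s : Nat) :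
    dpart tab n n s
      = (List.range' (s + 1 - n) (min (s + 1) n - (s + 1 - n))).map
          (fun i => dcell tab i (s - i)) := by
  unfold dpart
  by_cases hn : s + 1 - n ≤ min (s + 1) n
  · rw [← filterMap_range_interval (fun i => dcell tab i (s - i)) (s + 1 - n) n (min (s+1) n) (by omega) hn]
    apply List.filterMap_congr
    intro x hx
    simp only [List.mem_range] at hx
    by_cases h : x ≤ s ∧ s < x + n
    · rw [if_pos h, if_pos (by omega)]
    · rw [if_neg h, if_neg ?_]
      intro hc
      obtain ⟨hc1, hc2⟩ := hc
      have hc3 : x < min (s+1) n := hc2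
      have hc4 : x < s + 1 := lt_of_lt_of_le hc3 (min_le_left _ _)
      have hc5 : x < n := lt_of_lt_of_le hc3 (min_le_right _ _)
      exact h ⟨by omega, by omega⟩
  · -- s ≥ 2n-1 beyond the last diagonal (or n = 0): both sides empty
    have hnil : ∀ i ∈ List.range n, (if i ≤ s ∧ s < i + n then some (dcell tab i (s - i)) else none) = none := by
      intro i hi
      simp only [List.mem_range] at hi
      rw [if_neg ?_]
      intro hcc
      exact hn (by omega)
    rw [List.filterMap_eq_nil_iff.mpr hnil]
    have h0 : min (s + 1) n - (s + 1 - n) = 0 := by omega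
    rw [h0]
    simp


lemma pass_eq {γ : Type} (g : γ → List Char) :
    ∀ (ss : List γ) (res : List String),
      ss.foldl (fun res x => if 5 ≤ (g x).length then res ++ [String.ofList (g x)] else res) res
        = res ++ (((ss.map g).filter (fun d => 5 ≤ d.length)).map String.ofList) := by
  intro ss
  induction ss with
  | nil => intro res; simp
  | cons a t ih =>
    intro res
    simp only [List.foldl_cons, List.map_cons, List.filter_cons]
    by_cases h : 5 ≤ (g a).length
    · rw [if_pos h, ih]; simp [h]
    · rw [if_neg h, ih]; simp [h]

lemma buckets_eq (tab : List String) (n : Nat) :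
    (List.range n).foldl (fun bs i =>
        (List.range n).foldl (fun bs j =>
          bs.modify (i + j) (fun d => d ++ [pvCell tab i (j : Int)])) bs)
      (if n = 0 then [] else List.replicate (2 * n - 1) [])
      = (List.range (2 * n - 1)).map (fun s => dpart tab n n s) := by
  apply List.ext_getElem?
  intro s
  rw [outer_fold_getElem]
  by_cases hn : n = 0
  · subst hn; simp
  · rw [if_neg hn, List.getElem?_replicate, List.getElem?_map]
    by_cases hs : s < 2 * n - 1
    · rw [List.getElem?_range hs]
      simp [hs]
    · have h1 : (List.range (2 * n - 1))[s]? = none := by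
        rw [List.getElem?_eq_none] ; simp ; omega
      rw [h1]
      simp [hs]

lemma alt_eq (tab : List String) :
    find_all_anti_crosses_alt tab
      = (((List.range (2 * tab.length - 1)).map (fun s => dpart tab tab.length tab.length s)).filter
          (fun d => 5 ≤ d.length)).map String.ofList := by
  simp only [find_all_anti_crosses_alt]
  rw [buckets_eq]

lemma diag1_eq (tab : List String) (col : Nat) (_h : col < tab.length) :
    pvWhileDiag tab tab.length 0 (col : Int) [] = dpart tab tab.length tab.length col := by
  rw [whileDiag_eq, dpart_full, List.nil_append]
  have e1 : min (tab.length - 0) (((col : Int)) + 1).toNat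
      = min (col + 1) tab.length - (col + 1 - tab.length) := by omega
  rw [e1]
  have e2 : col + 1 - tab.length = 0 := by omega
  rw [e2]
  apply List.map_congr_left
  intro i _
  congr 1

lemma diag2_eq (tab : List String) (k : Nat) (_h : k < tab.length - 1) :
    pvWhileDiag tab tab.length (((1 : Int) + (k : Int)).toNat) ((tab.length : Int) - 1) []
      = dpart tab tab.length tab.length (tab.length + k) := by
  rw [whileDiag_eq, dpart_full, List.nil_append]
  have e0 : ((1 : Int) + (k : Int)).toNat = k + 1 := by omega
  rw [e0]
  have e1 : min (tab.length - (k + 1)) (((tab.length : Int) - 1) + 1).toNat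
      = min (tab.length + k + 1) tab.length - (tab.length + k + 1 - tab.length) := by omega
  rw [e1]
  have e2 : tab.length + k + 1 - tab.length = k + 1 := by omega
  rw [e2]
  apply List.map_congr_left
  intro i _
  congr 1
  omega

lemma mapA (tab : List String) :
    (List.range tab.length).map (fun (col : Nat) => pvWhileDiag tab tab.length 0 (col : Int) [])
      ++ (PySem.List.pyRange 1 (tab.length : Int) 1).map
          (fun row => pvWhileDiag tab tab.length row.toNat ((tab.length : Int) - 1) [])
      = (List.range (2 * tab.length - 1)).map (fun s => dpart tab tab.length tab.length s) := by
  by_cases h0 : tab.length = 0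
  · rw [h0]
    rw [PySem.List.pyRange_one_eq_nil (by omega)]
    simp
  · have hsplit : 2 * tab.length - 1 = tab.length + (tab.length - 1) := by omega
    rw [hsplit, List.range_add, List.map_append]
    congr 1
    · apply List.map_congr_left
      intro col hcol
      simp only [List.mem_range] at hcol
      exact diag1_eq tab col hcol
    · rw [PySem.List.pyRange_one, List.map_map, List.map_map]
      have e1 : ((tab.length : Int) - 1).toNat = tab.length - 1 := by omega
      rw [e1]
      apply List.map_congr_left
      intro k hk
      simp only [List.mem_range] at hk
      simp only [Function.comp_apply]
      exact diag2_eq tab k hk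

lemma a_eq (tab : List String) :
    find_all_anti_crosses tab
      = (((List.range (2 * tab.length - 1)).map (fun s => dpart tab tab.length tab.length s)).filter
          (fun d => 5 ≤ d.length)).map String.ofList := by
  simp only [find_all_anti_crosses, pass_eq, List.nil_append]
  rw [← mapA, List.filter_append, List.map_append]

-- ===== VERDICT (by name: the statement is the Claim_ definition above) =====
theorem find_all_anti_crosses_spec : Claim_equal_find_all_anti_crosses := by
  intro tab _ _
  unfold Spec_find_all_anti_crosses
  rw [a_eq, alt_eq]
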